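-- pv_equiv track=rewrite | github.com/sir-toby/adventOfCode2021 | 09/advent_2021_09.py | checkAdjectent
-- ===== SOURCE A (Python) =====
-- def checkAdjectent(y, x, maxy, maxx, basinList):
--     neighbours = []
--     if y > 0: neighbours.append((y-1, x))
--     if y < maxy: neighbours.append((y+1, x))
--     if x > 0: neighbours.append((y, x-1))
--     if x < maxx: neighbours.append((y, x+1))
--
--     appends = []
--     for basin in basinList:
--         if any((neighbour in basin) for neighbour in neighbours):
--             appends.append(basin)
--     if len(appends) == 0:
--         basinList.append([(y, x)])
--     elif len(appends) >= 1:
--         newBasin = []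
--         for bas in appends:
--             basinList.remove(bas)
--             for coords in bas:
--                 newBasin.append(coords)
--         newBasin.append((y, x))
--         basinList.append(newBasin)
--     return basinList
-- ===== SOURCE B (Python) =====
-- def checkAdjectent(y, x, maxy, maxx, basinList):
--     neighbours = [n for n, ok in (((y - 1, x), y > 0), ((y + 1, x), y < maxy),
--                                   ((y, x - 1), x > 0), ((y, x + 1), x < maxx)) if ok]
--     rest, merged = [], []
--     for basin in basinList:
--         if any(n in basin for n in neighbours):
--             merged.extend(basin)
--         else:
--             rest.append(basin)
--     rest.append(merged + [(y, x)])
--     basinList[:] = rest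
--     return basinList
-- ===== Notes on version B (the rewrite author's own statement) =====
-- stated objective: simpler
-- what changed: A filters matching basins into a second list and then mutates basinList with one O(n) list.remove call per matched basin plus a separate empty/non-empty case split; B does a single partition pass (unmatched basins kept, matched basins' cells concatenated) with no remove scans and no case split, since the no-match case degenerates to appending [(y,x)].
import Mathlib
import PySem

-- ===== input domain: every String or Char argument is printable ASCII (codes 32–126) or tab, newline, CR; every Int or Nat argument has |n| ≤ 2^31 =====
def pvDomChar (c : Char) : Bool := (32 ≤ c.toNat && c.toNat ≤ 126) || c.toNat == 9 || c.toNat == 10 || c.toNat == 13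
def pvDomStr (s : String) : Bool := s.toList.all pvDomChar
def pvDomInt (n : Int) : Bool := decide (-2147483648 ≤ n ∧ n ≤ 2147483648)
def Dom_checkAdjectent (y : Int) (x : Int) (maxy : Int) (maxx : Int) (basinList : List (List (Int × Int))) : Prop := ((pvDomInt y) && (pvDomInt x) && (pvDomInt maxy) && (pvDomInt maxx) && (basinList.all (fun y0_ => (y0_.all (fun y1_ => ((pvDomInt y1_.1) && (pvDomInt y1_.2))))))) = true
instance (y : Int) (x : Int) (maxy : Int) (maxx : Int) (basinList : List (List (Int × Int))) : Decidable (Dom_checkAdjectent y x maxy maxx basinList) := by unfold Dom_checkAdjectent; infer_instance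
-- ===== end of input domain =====

-- B replaces A's filter-then-remove-then-concat mutation (with its empty/non-empty case split)
-- by a single partition pass; equal return values proved below (both Pythons also mutate
-- basinList in place to that same final list).

-- ===== PORT A =====
-- Python 'basinList.remove(bas)': the 'none' (ValueError) arm never fires inside A, where every
-- removed basin is still present; kept as the identity only to make the helper total.
def pyRemoveA (bl : List (List (Int × Int))) (bas : List (Int × Int)) : List (List (Int × Int)) :=
  match PySem.List.remove? bl bas with
  | some l => l
  | none => bl

-- A's four 'if … : neighbours.append(…)' statements
def neighboursA (y : Int) (x : Int) (maxy : Int) (maxx : Int) : List (Int × Int) :=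
  let n0 : List (Int × Int) := []
  let n1 := if y > 0 then n0 ++ [(y - 1, x)] else n0
  let n2 := if y < maxy then n1 ++ [(y + 1, x)] else n1
  let n3 := if x > 0 then n2 ++ [(y, x - 1)] else n2
  if x < maxx then n3 ++ [(y, x + 1)] else n3

def checkAdjectent (y : Int) (x : Int) (maxy : Int) (maxx : Int) (basinList : List (List (Int × Int))) : List (List (Int × Int)) :=
  let neighbours := neighboursA y x maxy maxx
  let appends := basinList.foldl (fun acc basin =>
    if neighbours.any (fun nb => decide (nb ∈ basin)) then acc ++ [basin] else acc) []
  if appends.length = 0 then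
    basinList ++ [[(y, x)]]
  else
    let bl := appends.foldl pyRemoveA basinList
    let newBasin := appends.foldl (fun nb bas => bas.foldl (fun nb2 c => nb2 ++ [c]) nb) []
    bl ++ [newBasin ++ [(y, x)]]

-- ===== PORT B =====
-- B's comprehension '[n for n, ok in (…) if ok]'
def neighboursB (y : Int) (x : Int) (maxy : Int) (maxx : Int) : List (Int × Int) :=
  (([((y - 1, x), decide (y > 0)), ((y + 1, x), decide (y < maxy)),
     ((y, x - 1), decide (x > 0)), ((y, x + 1), decide (x < maxx))]).filter (fun a => a.2)).map (fun a => a.1)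

def checkAdjectent_alt (y : Int) (x : Int) (maxy : Int) (maxx : Int) (basinList : List (List (Int × Int))) : List (List (Int × Int)) :=
  let neighbours := neighboursB y x maxy maxx
  let p := basinList.foldl
    (fun (p : List (List (Int × Int)) × List (Int × Int)) basin =>
      if neighbours.any (fun nb => decide (nb ∈ basin)) then (p.1, p.2 ++ basin)
      else (p.1 ++ [basin], p.2)) ([], [])
  p.1 ++ [p.2 ++ [(y, x)]]

-- ===== PRECONDITION & SPEC =====
def Spec_checkAdjectent (y : Int) (x : Int) (maxy : Int) (maxx : Int) (basinList : List (List (Int × Int))) (out : List (List (Int × Int))) : Prop := out = checkAdjectent_alt y x maxy maxx basinList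
instance (y : Int) (x : Int) (maxy : Int) (maxx : Int) (basinList : List (List (Int × Int))) (out : List (List (Int × Int))) : Decidable (Spec_checkAdjectent y x maxy maxx basinList out) := by unfold Spec_checkAdjectent; infer_instance

-- ===== CLAIM (what is proved, stated in full; the proofs are below) =====
def Claim_equal_checkAdjectent : Prop := ∀ (y : Int) (x : Int) (maxy : Int) (maxx : Int) (basinList : List (List (Int × Int))), Dom_checkAdjectent y x maxy maxx basinList → Spec_checkAdjectent y x maxy maxx basinList (checkAdjectent y x maxy maxx basinList)

-- ===== LEMMAS AND PROOFS =====

lemma neighB_eq_neighA (y x maxy maxx : Int) :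
    neighboursB y x maxy maxx = neighboursA y x maxy maxx := by
  unfold neighboursA neighboursB
  by_cases h1 : y > 0 <;> by_cases h2 : y < maxy <;> by_cases h3 : x > 0 <;> by_cases h4 : x < maxx <;>
    simp [h1, h2, h3, h4]

-- removing values that all differ from the head leaves the head in place
lemma foldl_pyRemoveA_cons (q : List (Int × Int) → Bool) (h : List (Int × Int))
    (hq : q h = false) :
    ∀ (vs : List (List (Int × Int))) (t : List (List (Int × Int))),
      (∀ v ∈ vs, q v = true) →
      vs.foldl pyRemoveA (h :: t) = h :: vs.foldl pyRemoveA t := by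
  intro vs
  induction vs with
  | nil => intro t _; rfl
  | cons v vs ih =>
    intro t hv
    have hne : h ≠ v := by
      intro e; subst e; rw [hv h (by simp)] at hq; cases hq
    have h1 : pyRemoveA (h :: t) v = h :: pyRemoveA t v := by
      unfold pyRemoveA
      rw [PySem.List.remove?_cons_of_ne t hne]
      cases PySem.List.remove? t v <;> simp
    simp only [List.foldl_cons, h1]
    exact ih (pyRemoveA t v) (fun w hw => hv w (by simp [hw]))

-- A's remove loop: removing the matched basins (first-equal each) keeps exactly the unmatched ones
lemma foldl_pyRemoveA_filter (q : List (Int × Int) → Bool) :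
    ∀ l : List (List (Int × Int)),
      (l.filter q).foldl pyRemoveA l = l.filter (fun b => !q b) := by
  intro l
  induction l with
  | nil => rfl
  | cons h t ih =>
    by_cases hq : q h = true
    · have : pyRemoveA (h :: t) h = t := by
        unfold pyRemoveA; rw [PySem.List.remove?_cons_self]
      simp [List.filter_cons, hq, this, ih]
    · have hq' : q h = false := by simpa using hq
      rw [List.filter_cons_of_neg (by simp [hq']),
          foldl_pyRemoveA_cons q h hq' _ t (fun v hv => (List.mem_filter.mp hv).2)]
      simp [List.filter_cons, hq', ih]

-- B's single pass is a partition: unmatched basins kept in order, matched basins' cells concatenated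
lemma foldl_partition (q : List (Int × Int) → Bool) :
    ∀ (l : List (List (Int × Int))) (r : List (List (Int × Int))) (m : List (Int × Int)),
      l.foldl (fun (p : List (List (Int × Int)) × List (Int × Int)) basin =>
          if q basin then (p.1, p.2 ++ basin) else (p.1 ++ [basin], p.2)) (r, m)
        = (r ++ l.filter (fun b => !q b), m ++ (l.filter q).flatten) := by
  intro l
  induction l with
  | nil => intro r m; simp
  | cons h t ih =>
    intro r m
    by_cases hq : q h = true
    · simp [List.filter_cons, hq, ih]
    · have hq' : q h = false := by simpa using hq
      simp [List.filter_cons, hq', ih]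

-- the two bodies agree for any fixed neighbour predicate
lemma bodies_eq (q : List (Int × Int) → Bool) (y x : Int) (l : List (List (Int × Int))) :
    (let appends := l.foldl (fun acc basin => if q basin then acc ++ [basin] else acc)
        ([] : List (List (Int × Int)));
     if appends.length = 0 then l ++ [[(y, x)]]
     else (appends.foldl pyRemoveA l)
       ++ [(appends.foldl (fun nb bas => bas.foldl (fun nb2 c => nb2 ++ [c]) nb)
              ([] : List (Int × Int))) ++ [(y, x)]])
    = (let p := l.foldl (fun (p : List (List (Int × Int)) × List (Int × Int)) basin =>
          if q basin then (p.1, p.2 ++ basin) else (p.1 ++ [basin], p.2)) ([], []);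
       p.1 ++ [p.2 ++ [(y, x)]]) := by
  have happ : l.foldl (fun acc basin => if q basin then acc ++ [basin] else acc)
      ([] : List (List (Int × Int))) = l.filter q := by
    simpa using PySem.List.foldl_append_if_eq_filter q l []
  have hflat : ∀ ap : List (List (Int × Int)),
      ap.foldl (fun nb bas => bas.foldl (fun nb2 c => nb2 ++ [c]) nb) ([] : List (Int × Int))
        = ap.flatten := by
    intro ap
    simp only [PySem.List.foldl_append_singleton]
    simpa using PySem.List.foldl_append_eq_flatten ap []
  simp only [happ, hflat, foldl_partition q l [] []]
  by_cases hnil : l.filter q = []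
  · have hall : ∀ b ∈ l, ¬ q b := by simpa [List.filter_eq_nil_iff] using hnil
    have hself : l.filter (fun b => !q b) = l :=
      List.filter_eq_self.mpr (fun b hb => by simp [hall b hb])
    simp [hnil, hself]
  · have : (l.filter q).length ≠ 0 := by simpa [List.length_eq_zero_iff] using hnil
    simp [this, foldl_pyRemoveA_filter q l]

-- ===== VERDICT (by name: the statement is the Claim_ definition above) =====
theorem checkAdjectent_spec : Claim_equal_checkAdjectent := by
  intro y x maxy maxx l _
  show checkAdjectent y x maxy maxx l = checkAdjectent_alt y x maxy maxx l
  unfold checkAdjectent checkAdjectent_alt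
  rw [neighB_eq_neighA]
  exact bodies_eq (fun basin => (neighboursA y x maxy maxx).any (fun nb => decide (nb ∈ basin))) y x l
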